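/- GENERATED by farm/mkstatement.py from design/units.tsv (unit `DGifGetExtensionNext.P`) and the assertions of Gif/Spec/Seg_DGifGetExtensionNext.lean — do not edit.
   THE STATEMENT of the proof unit `DGifGetExtensionNext.P`: segment P of `DGifGetExtensionNext` (16 instructions; entries 0x109820;
   exits 0x10986c; ranges 0x109820-0x10986c)
   takes each of its entry assertions to one of its exit assertions (`Gif.Spec.DGifGetExtensionNext.SegP`), given the contracts of its callees.
   What the names mean: ProgX/Base/Spec/Basic.lean (the shared hypotheses), Gif/Spec/Seg_DGifGetExtensionNext.lean (the assertions). The theorem to prove: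
   `theorem DGifGetExtensionNext_P_ok : Gif.Spec.DGifGetExtensionNext_P.Statement`. -/
import Gif.Code
import Gif.Dec.All
import Gif.Labels
import Gif.Spec.Seg_DGifGetExtensionNext
namespace Gif.Spec.DGifGetExtensionNext_P
open X86 X86.User Asan

/-- The statement of unit `DGifGetExtensionNext.P`. -/
def Statement : Prop :=
  ∀ (Lay : Layout) (_hLay : Lay.hi = 0x1000000) (μ : Microarch) (_hμ : UserX.MicroOK μ) (u₀ : State)
    (_hcode : HasCodeNat Lay u₀ Gif.L.DGifGetExtensionNext.entry Gif.Code.code_DGifGetExtensionNext.nat Gif.L.DGifGetExtensionNext.size),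
    Gif.Spec.DGifGetExtensionNext.SegP Lay μ u₀

end Gif.Spec.DGifGetExtensionNext_P
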